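-- pv_equiv track=rewrite | github.com/cjoaog31/IOTGuia4 | Controladores/APIValidations.py | validateRequiredCreationValues
-- ===== SOURCE A (Python) =====
-- def validateRequiredCreationValues(data: dict, attributes: list):
--     keys = data.keys()
--
--     for attribute in attributes:
--         if attribute != 'id':
--             if attribute not in keys:
--                 return False;
--
--     for key in keys:
--         if key not in attributes:
--             return False
--
--     return True
-- ===== SOURCE B (Python) =====
-- def validateRequiredCreationValues(data: dict, attributes: list):
--     # Canonical-form check: sort the distinct keys and compare for equality
--     # against the sorted required attributes (attributes minus 'id'), or,
--     # when 'id' is itself an attribute, against the sorted full attribute set.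
--     ks = sorted(set(data.keys()))
--     if ks == sorted(set(attributes) - {'id'}):
--         return True
--     return 'id' in attributes and ks == sorted(set(attributes))
-- ===== Notes on version B (the rewrite author's own statement) =====
-- stated objective: alternative
-- what changed: Replaced A's two membership loops with a canonical-form comparison: the sorted distinct keys must equal the sorted attribute set minus 'id', or (when 'id' is an attribute) the sorted full attribute set; validation is list equality of sorted forms, no membership test remains.
import Mathlib
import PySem

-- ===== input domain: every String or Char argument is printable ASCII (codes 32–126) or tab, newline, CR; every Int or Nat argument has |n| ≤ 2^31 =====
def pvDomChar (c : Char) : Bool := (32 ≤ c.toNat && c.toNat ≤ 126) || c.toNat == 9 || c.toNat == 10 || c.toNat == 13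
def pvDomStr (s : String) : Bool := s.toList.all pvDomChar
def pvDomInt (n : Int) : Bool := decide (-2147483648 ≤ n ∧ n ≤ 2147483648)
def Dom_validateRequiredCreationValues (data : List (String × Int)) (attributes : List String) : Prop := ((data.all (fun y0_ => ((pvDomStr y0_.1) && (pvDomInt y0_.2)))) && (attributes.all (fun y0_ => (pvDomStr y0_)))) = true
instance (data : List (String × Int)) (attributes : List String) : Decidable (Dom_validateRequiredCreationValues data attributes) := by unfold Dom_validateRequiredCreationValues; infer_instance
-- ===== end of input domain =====

-- B replaces A's membership loops with a canonical-form comparison (equality of sorted distinct lists); objective: alternative.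

-- ===== PORT A =====
-- first loop: for attribute in attributes: if attribute != 'id' and attribute not in keys: return False
def pvALoop1 (keys : List String) : List String → Bool
  | [] => true
  | a :: rest =>
    if a ≠ "id" then
      if ¬ keys.contains a then false else pvALoop1 keys rest
    else pvALoop1 keys rest

-- second loop: for key in keys: if key not in attributes: return False
def pvALoop2 (attributes : List String) : List String → Bool
  | [] => true
  | k :: rest => if ¬ attributes.contains k then false else pvALoop2 attributes rest

-- keys = data.keys() (distinct keys in first-insertion order)
def validateRequiredCreationValues (data : List (String × Int)) (attributes : List String) : Bool :=
  if pvALoop1 (PySem.List.dedup (data.map Prod.fst)) attributes then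
    pvALoop2 attributes (PySem.List.dedup (data.map Prod.fst))
  else false

-- ===== PORT B =====
-- ks = sorted(set(data.keys())); ks == sorted(set(attributes) - {'id'}) or ('id' in attributes and ks == sorted(set(attributes)))
def validateRequiredCreationValues_alt (data : List (String × Int)) (attributes : List String) : Bool :=
  if PySem.List.sorted (PySem.Set.ofList (PySem.List.dedup (data.map Prod.fst))) (fun x => x) false
      = PySem.List.sorted (PySem.Set.discard (PySem.Set.ofList attributes) "id") (fun x => x) false then
    true
  else
    attributes.contains "id" &&
      decide (PySem.List.sorted (PySem.Set.ofList (PySem.List.dedup (data.map Prod.fst))) (fun x => x) false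
        = PySem.List.sorted (PySem.Set.ofList attributes) (fun x => x) false)

-- ===== PRECONDITION & SPEC =====
def Spec_validateRequiredCreationValues (data : List (String × Int)) (attributes : List String) (out : Bool) : Prop := out = validateRequiredCreationValues_alt data attributes
instance (data : List (String × Int)) (attributes : List String) (out : Bool) : Decidable (Spec_validateRequiredCreationValues data attributes out) := by unfold Spec_validateRequiredCreationValues; infer_instance

-- ===== CLAIM =====
def Claim_equal_validateRequiredCreationValues : Prop := ∀ (data : List (String × Int)) (attributes : List String), Dom_validateRequiredCreationValues data attributes → Spec_validateRequiredCreationValues data attributes (validateRequiredCreationValues data attributes)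

-- ===== LEMMAS AND PROOFS =====
theorem pvALoop1_eq_true (keys : List String) (attrs : List String) :
    pvALoop1 keys attrs = true ↔ ∀ a ∈ attrs, a ≠ "id" → a ∈ keys := by
  induction attrs with
  | nil => simp [pvALoop1]
  | cons a rest ih =>
    by_cases h : a = "id"
    · simp [pvALoop1, h, ih]
    · by_cases hk : a ∈ keys
      · simp [pvALoop1, h, hk, ih]
      · simp only [pvALoop1, if_pos h]
        rw [if_pos (by simpa using hk)]
        simp only [Bool.false_eq_true, false_iff]
        intro hcon
        exact absurd (hcon a List.mem_cons_self h) hk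

theorem pvALoop2_eq_true (attributes : List String) (keys : List String) :
    pvALoop2 attributes keys = true ↔ ∀ k ∈ keys, k ∈ attributes := by
  induction keys with
  | nil => simp [pvALoop2]
  | cons k rest ih =>
    by_cases hk : k ∈ attributes
    · simp [pvALoop2, hk, ih]
    · have hc : attributes.contains k = false := by simpa using hk
      simp only [pvALoop2, hc]
      rw [if_pos (by simp)]
      simp only [Bool.false_eq_true, false_iff]
      intro hcon
      exact absurd (hcon k List.mem_cons_self) hk

-- equality of the sorted forms of two Nodup lists says exactly: same members
theorem sorted_eq_iff_same_mem (xs ys : List String) (hx : xs.Nodup) (hy : ys.Nodup) :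
    PySem.List.sorted xs (fun x => x) false = PySem.List.sorted ys (fun x => x) false ↔
      ∀ a, a ∈ xs ↔ a ∈ ys := by
  rw [PySem.List.sorted_id_eq_sorted_id_iff_perm, List.perm_ext_iff_of_nodup hx hy]

theorem validateRequiredCreationValues_spec : Claim_equal_validateRequiredCreationValues := by
  unfold Claim_equal_validateRequiredCreationValues Spec_validateRequiredCreationValues
  intro data attributes _
  unfold validateRequiredCreationValues validateRequiredCreationValues_alt
  set K := PySem.List.dedup (data.map Prod.fst) with hK
  have hKnd : K.Nodup := PySem.List.nodup_dedup _
  have hKof : PySem.Set.ofList K = K := PySem.Set.ofList_eq_self_of_nodup K hKnd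
  have hAnd : (PySem.Set.ofList attributes).Nodup := PySem.Set.nodup_ofList _
  have hRnd : (PySem.Set.discard (PySem.Set.ofList attributes) "id").Nodup :=
    PySem.Set.nodup_discard _ _ hAnd
  rw [hKof]
  rw [Bool.eq_iff_iff]
  -- characterize both sides as membership statements
  have hreq : ∀ a, a ∈ PySem.Set.discard (PySem.Set.ofList attributes) "id" ↔
      (a ∈ attributes ∧ a ≠ "id") := by
    intro a; rw [PySem.Set.mem_discard, PySem.Set.mem_ofList]
  have hatt : ∀ a, a ∈ PySem.Set.ofList attributes ↔ a ∈ attributes := fun a =>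
    PySem.Set.mem_ofList _ _
  constructor
  · intro h
    split at h
    case isFalse => simp at h
    case isTrue h1 =>
      have h1' := (pvALoop1_eq_true K attributes).1 h1
      have h2 := (pvALoop2_eq_true attributes K).1 h
      by_cases hid : "id" ∈ K
      · -- K has the same members as set(attributes)
        have hidA : "id" ∈ attributes := h2 _ hid
        have hsame : ∀ a, a ∈ K ↔ a ∈ PySem.Set.ofList attributes := by
          intro a
          rw [hatt]
          constructor
          · exact h2 a
          · intro ha
            by_cases hai : a = "id"
            · exact hai ▸ hid
            · exact h1' a ha hai
        split
        · rfl
        · simp only [Bool.and_eq_true, decide_eq_true_eq]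
          exact ⟨by simpa using hidA,
            (sorted_eq_iff_same_mem K _ hKnd hAnd).2 hsame⟩
      · -- K has the same members as set(attributes) - {'id'}
        have hsame : ∀ a, a ∈ K ↔ a ∈ PySem.Set.discard (PySem.Set.ofList attributes) "id" := by
          intro a
          rw [hreq]
          constructor
          · intro ha
            refine ⟨h2 a ha, ?_⟩
            intro hai; exact hid (hai ▸ ha)
          · intro ⟨ha, hai⟩; exact h1' a ha hai
        rw [if_pos ((sorted_eq_iff_same_mem K _ hKnd hRnd).2 hsame)]
  · intro h
    -- from B = true derive the two subset facts, then run A's loops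
    have hsub : (∀ a ∈ attributes, a ≠ "id" → a ∈ K) ∧ (∀ k ∈ K, k ∈ attributes) := by
      split at h
      case isTrue heq =>
        have hsame := (sorted_eq_iff_same_mem K _ hKnd hRnd).1 heq
        constructor
        · intro a ha hai; exact (hsame a).2 ((hreq a).2 ⟨ha, hai⟩)
        · intro k hk; exact ((hreq k).1 ((hsame k).1 hk)).1
      case isFalse =>
        simp only [Bool.and_eq_true, decide_eq_true_eq] at h
        obtain ⟨hidA, heq⟩ := h
        have hidA' : "id" ∈ attributes := by simpa using hidA
        have hsame := (sorted_eq_iff_same_mem K _ hKnd hAnd).1 heq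
        constructor
        · intro a ha hai; exact (hsame a).2 ((hatt a).2 ha)
        · intro k hk; exact (hatt k).1 ((hsame k).1 hk)
    rw [if_pos ((pvALoop1_eq_true K attributes).2 hsub.1)]
    exact (pvALoop2_eq_true attributes K).2 hsub.2
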